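-- pv_equiv track=rewrite | github.com/RajKamal2013/cstyle | done/single_long_comment.py | split23comment
-- ===== SOURCE A (Python) =====
-- def split23comment (comment_line, space, tab):
-- 	first_line = "";
-- 	second_line = "";
-- 	third_line = "";
-- 	count = 0;
-- 	temp_line = "";
-- 	for i in range (tab):
-- 		temp_line = temp_line + "\t";
-- 		count = count + 8;
-- 	for i in range (space):
-- 		temp_line = temp_line + " ";
-- 		count = count + 1;
-- 	comment_line = comment_line.lstrip("\t");
-- 	comment_line = comment_line.lstrip();
-- 	comment = comment_line.split();
-- 	#print "list", comment;
-- 	index = 0;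
-- 	for i in range(len(comment)):
-- 		count = count + len(comment[i]) + 1; #1 for space
-- 		if (count <= 80):
-- 			word = comment[i];
-- 			first_line = first_line +  comment[i] + " ";
-- 		else :
-- 			second_line = second_line + comment[i] + " ";
-- 	second_line = second_line.rstrip();
-- 	first_line = first_line.rstrip() + "\n";
-- 	if (second_line == "*/"):
-- 		second_line = temp_line + " " + second_line + "\n";
-- 		third_line = "";
-- 	else:
-- 		second_line = second_line.rstrip("*/");
-- 		second_line = second_line.rstrip();
-- 		second_line = temp_line + " " + "*" + " " + second_line + "\n";
-- 		third_line = temp_line + " " + "*/";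
-- 		third_line = third_line + "\n";
-- 	first_line = temp_line + first_line;
-- 	return first_line, second_line, third_line;
-- ===== SOURCE B (Python) =====
-- def split23comment(comment_line, space, tab):
--     # Closed-form indent, monotone prefix widths, then a BINARY SEARCH for the
--     # last word index k whose cumulative width still fits in 80 columns;
--     # the three lines are produced by slice-and-join.
--     indent = "\t" * max(tab, 0) + " " * max(space, 0)
--     words = comment_line.split()
--     prefix = [8 * max(tab, 0) + max(space, 0)]
--     for w in words:
--         prefix.append(prefix[-1] + len(w) + 1)
--     # prefix is strictly increasing, so the words that fit form a prefix:
--     # binary-search the largest k in [0, len(words)] with k == 0 or prefix[k] <= 80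
--     lo, hi = 0, len(words)
--     while lo < hi:
--         mid = (lo + hi + 1) // 2
--         if prefix[mid] <= 80:
--             lo = mid
--         else:
--             hi = mid - 1
--     k = lo
--     first_line = indent + " ".join(words[:k]) + "\n"
--     rest = " ".join(words[k:])
--     if rest == "*/":
--         return first_line, indent + " */\n", ""
--     return first_line, indent + " * " + rest.rstrip("*/").rstrip() + "\n", indent + " */\n"
-- ===== Notes on version B (the rewrite author's own statement) =====
-- stated objective: alternative
-- what changed: A finds the 80-column cut by a per-word branching loop that also builds both lines by repeated string concatenation; B builds the (strictly increasing) prefix-width table once, locates the cut index k by BINARY SEARCH over it, and emits the lines by slice-and-join (words[:k], words[k:]) with a closed-form indent.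
import Mathlib
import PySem

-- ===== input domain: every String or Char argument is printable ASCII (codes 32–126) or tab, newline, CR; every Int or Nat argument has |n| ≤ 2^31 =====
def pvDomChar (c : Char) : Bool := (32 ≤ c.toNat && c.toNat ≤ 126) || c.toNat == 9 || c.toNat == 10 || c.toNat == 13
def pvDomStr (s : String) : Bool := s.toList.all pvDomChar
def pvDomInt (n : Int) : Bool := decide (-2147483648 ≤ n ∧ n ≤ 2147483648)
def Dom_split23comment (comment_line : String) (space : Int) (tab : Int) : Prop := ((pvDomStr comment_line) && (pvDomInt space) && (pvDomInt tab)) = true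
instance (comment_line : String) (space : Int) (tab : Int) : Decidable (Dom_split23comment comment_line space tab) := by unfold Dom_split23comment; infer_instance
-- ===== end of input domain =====

-- B replaces A's interleaved count-and-branch word loop by: closed-form indent, a monotone
-- prefix-width table, a BINARY SEARCH for the cut index k, and slice-and-join of words[:k]/words[k:].


-- hand port of str.rstrip("*/"): drop trailing '*' and '/' characters (exact; used by both Pythons)
def rstripStarSlash (s : List Char) : List Char :=
  (s.reverse.dropWhile (fun c => c == '*' || c == '/')).reverse

-- hand port of str.lstrip("\t"): drop leading tab characters (exact)
def lstripTab (s : List Char) : List Char := s.dropWhile (fun c => c == '\t')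

-- ===== PORT A =====
def split23comment (comment_line : String) (space : Int) (tab : Int) : String × String × String :=
  -- first_line = ""; second_line = ""; count = 0; temp_line = ""  (state threaded below)
  -- for i in range(tab): temp_line += "\t"; count += 8
  let tc1 := (PySem.List.pyRange 0 tab 1).foldl
    (fun (p : List Char × Int) _ => (p.1 ++ ['\t'], p.2 + 8)) (([] : List Char), (0 : Int))
  -- for i in range(space): temp_line += " "; count += 1
  let tc2 := (PySem.List.pyRange 0 space 1).foldl
    (fun (p : List Char × Int) _ => (p.1 ++ [' '], p.2 + 1)) tc1
  let temp_line := tc2.1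
  -- comment_line = comment_line.lstrip("\t").lstrip(); comment = comment_line.split()
  let comment := PySem.Chars.split₀ (PySem.Chars.lstrip (lstripTab comment_line.toList))
  -- for i in range(len(comment)): count += len(comment[i]) + 1; if count <= 80: first += w+" " else second += w+" "
  let st := comment.foldl
    (fun (s : Int × List Char × List Char) w =>
      if s.1 + (w.length : Int) + 1 ≤ 80 then (s.1 + (w.length : Int) + 1, s.2.1 ++ w ++ [' '], s.2.2)
      else (s.1 + (w.length : Int) + 1, s.2.1, s.2.2 ++ w ++ [' ']))
    (tc2.2, ([] : List Char), ([] : List Char))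
  let second_line := PySem.Chars.rstrip st.2.2
  let first_line := PySem.Chars.rstrip st.2.1 ++ ['\n']
  if second_line = ['*', '/'] then
    (String.ofList (temp_line ++ first_line),
     String.ofList (temp_line ++ [' '] ++ second_line ++ ['\n']),
     String.ofList [])
  else
    let second_line2 := PySem.Chars.rstrip (rstripStarSlash second_line)
    (String.ofList (temp_line ++ first_line),
     String.ofList (temp_line ++ [' '] ++ ['*'] ++ [' '] ++ second_line2 ++ ['\n']),
     String.ofList (temp_line ++ [' '] ++ ['*', '/'] ++ ['\n']))

-- ===== PORT B =====
-- the 'while lo < hi' binary-search loop of Source B; mid = (lo+hi+1)//2 is inlined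
-- (lo, hi are nonnegative Python ints, so Nat with '/' matches Python's '//';
--  prefix[mid] is always in range since 1 ≤ mid ≤ hi ≤ len(words) < len(prefix), so getD is exact)
def bsearchGo (pre : List Int) (lo hi : Nat) : Nat :=
  if h : lo < hi then
    if pre.getD ((lo + hi + 1) / 2) 0 ≤ 80 then bsearchGo pre ((lo + hi + 1) / 2) hi
    else bsearchGo pre lo ((lo + hi + 1) / 2 - 1)
  else lo
termination_by hi - lo
decreasing_by all_goals omega

def split23comment_alt (comment_line : String) (space : Int) (tab : Int) : String × String × String :=
  -- indent = "\t"*max(tab,0) + " "*max(space,0)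
  let indent := PySem.List.pyRepeat ['\t'] tab ++ PySem.List.pyRepeat [' '] space
  let words := PySem.Chars.split₀ comment_line.toList
  -- prefix = [base]; for w in words: prefix.append(prefix[-1] + len(w) + 1)
  let pre := (words.foldl (fun (p : Int × List Int) w =>
      (p.1 + (w.length : Int) + 1, p.2 ++ [p.1 + (w.length : Int) + 1]))
      ((8 * max tab 0 + max space 0), [8 * max tab 0 + max space 0])).2
  -- binary search: lo, hi = 0, len(words); while lo < hi: …
  let k : Nat := bsearchGo pre 0 words.length
  let first_line := indent ++ PySem.Chars.join [' '] (PySem.List.slice words none (some (k : Int))) ++ ['\n']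
  let rest := PySem.Chars.join [' '] (PySem.List.slice words (some (k : Int)) none)
  if rest = ['*', '/'] then
    (String.ofList first_line, String.ofList (indent ++ [' ', '*', '/', '\n']), String.ofList [])
  else
    (String.ofList first_line,
     String.ofList (indent ++ [' ', '*', ' '] ++ PySem.Chars.rstrip (rstripStarSlash rest) ++ ['\n']),
     String.ofList (indent ++ [' ', '*', '/', '\n']))

-- ===== PRECONDITION & SPEC =====
def Spec_split23comment (comment_line : String) (space : Int) (tab : Int) (out : String × String × String) : Prop := out = split23comment_alt comment_line space tab
instance (comment_line : String) (space : Int) (tab : Int) (out : String × String × String) : Decidable (Spec_split23comment comment_line space tab out) := by unfold Spec_split23comment; infer_instance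

-- ===== CLAIM (what is proved, stated in full; the proofs are below) =====
def Claim_equal_split23comment : Prop := ∀ (comment_line : String) (space : Int) (tab : Int), Dom_split23comment comment_line space tab → Spec_split23comment comment_line space tab (split23comment comment_line space tab)

-- ===== LEMMAS AND PROOFS =====

-- each word followed by one space, concatenated (A's line accumulators)
def flatW (ws : List (List Char)) : List Char := ws.flatMap (fun w => w ++ [' '])

-- A's break index: number of leading words kept on the first line starting from width c
def kIdx (c : Int) : List (List Char) → Nat
  | [] => 0
  | w :: ws => if c + (w.length : Int) + 1 ≤ 80 then kIdx (c + (w.length : Int) + 1) ws + 1 else 0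

-- B's prefix-width table, recursively: base followed by the running totals
def prefixRec (b : Int) : List (List Char) → List Int
  | [] => [b]
  | w :: ws => b :: prefixRec (b + (w.length : Int) + 1) ws

-- the common normal form both ports are reduced to
def assemble (T : List Char) (b : Int) (ws : List (List Char)) : String × String × String :=
  let k := kIdx b ws
  let F := List.intercalate [' '] (ws.take k)
  let S := List.intercalate [' '] (ws.drop k)
  if S = ['*', '/'] then
    (String.ofList (T ++ (F ++ ['\n'])), String.ofList (T ++ [' '] ++ S ++ ['\n']), String.ofList [])
  else
    (String.ofList (T ++ (F ++ ['\n'])),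
     String.ofList (T ++ [' '] ++ ['*'] ++ [' '] ++ PySem.Chars.rstrip (rstripStarSlash S) ++ ['\n']),
     String.ofList (T ++ [' '] ++ ['*', '/'] ++ ['\n']))

theorem foldl_app_const (l : List Int) (c : Char) (k : Int) (a : List Char) (n : Int) :
    l.foldl (fun (p : List Char × Int) _ => (p.1 ++ [c], p.2 + k)) (a, n)
      = (a ++ List.replicate l.length c, n + k * (l.length : Int)) := by
  induction l generalizing a n with
  | nil => simp
  | cons x xs ih =>
    simp only [List.foldl_cons, ih, List.length_cons, Prod.mk.injEq]
    constructor
    · simp [List.replicate_succ, List.append_assoc]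
    · push_cast; ring

theorem length_pyRange01 (n : Int) : (PySem.List.pyRange 0 n 1).length = n.toNat := by
  simp only [PySem.List.pyRange]
  rw [if_neg one_ne_zero]
  simp only [List.length_map, List.length_range]
  rw [if_pos (by norm_num : (0 : Int) < 1)]
  split_ifs with h <;> omega

theorem go_skip (c : Char) (s : List Char) (acc : List (List Char))
    (h : PySem.Chars.isspace c = true) :
    PySem.Chars.split₀.go (c :: s) [] acc = PySem.Chars.split₀.go s [] acc := by
  rw [PySem.Chars.split₀.go.eq_def]
  simp [h]

theorem split₀_dropWhile (p : Char → Bool) (hp : ∀ c, p c = true → PySem.Chars.isspace c = true)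
    (s : List Char) : PySem.Chars.split₀ (s.dropWhile p) = PySem.Chars.split₀ s := by
  induction s with
  | nil => rfl
  | cons c cs ih =>
    by_cases h : p c
    · rw [List.dropWhile_cons_of_pos h, ih]
      show PySem.Chars.split₀.go cs [] [] = PySem.Chars.split₀.go (c :: cs) [] []
      rw [go_skip c cs [] (hp c h)]
    · rw [List.dropWhile_cons_of_neg (by simp [h])]

theorem go_words (s : List Char) : ∀ (cur : List Char) (acc : List (List Char)),
    (∀ c ∈ cur, PySem.Chars.isspace c = false) →
    (∀ w ∈ acc, w ≠ [] ∧ ∀ c ∈ w, PySem.Chars.isspace c = false) →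
    ∀ w ∈ PySem.Chars.split₀.go s cur acc, w ≠ [] ∧ ∀ c ∈ w, PySem.Chars.isspace c = false := by
  induction s with
  | nil =>
    intro cur acc hcur hacc
    have heq : PySem.Chars.split₀.go [] cur acc
        = if cur.isEmpty = true then acc.reverse else (cur.reverse :: acc).reverse := rfl
    rw [heq]
    by_cases hc : cur = []
    · subst hc
      simp only [List.isEmpty_nil, if_true]
      intro w hw
      exact hacc w (by simpa using hw)
    · rw [if_neg (by simpa [List.isEmpty_iff] using hc)]
      intro w hw
      rw [List.mem_reverse, List.mem_cons] at hw
      rcases hw with h | h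
      · subst h
        exact ⟨by simpa using hc, fun ch hch => hcur ch (by simpa using hch)⟩
      · exact hacc w h
  | cons c s ih =>
    intro cur acc hcur hacc
    have heq : PySem.Chars.split₀.go (c :: s) cur acc
        = if PySem.Chars.isspace c = true then
            (if cur.isEmpty = true then PySem.Chars.split₀.go s [] acc
             else PySem.Chars.split₀.go s [] (cur.reverse :: acc))
          else PySem.Chars.split₀.go s (c :: cur) acc := rfl
    rw [heq]
    by_cases hc : PySem.Chars.isspace c
    · rw [if_pos hc]
      by_cases hcur0 : cur = []
      · subst hcur0
        simp only [List.isEmpty_nil, if_true]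
        exact ih [] acc (by simp) hacc
      · rw [if_neg (by simpa [List.isEmpty_iff] using hcur0)]
        refine ih [] (cur.reverse :: acc) (by simp) ?_
        intro w hw
        rcases List.mem_cons.mp hw with h | h
        · subst h
          exact ⟨by simpa using hcur0, fun ch hch => hcur ch (by simpa using hch)⟩
        · exact hacc w h
    · rw [if_neg hc]
      refine ih (c :: cur) acc ?_ hacc
      intro ch hch
      rcases List.mem_cons.mp hch with h | h
      · subst h; simpa using hc
      · exact hcur ch h

theorem split₀_words (s : List Char) :
    ∀ w ∈ PySem.Chars.split₀ s, w ≠ [] ∧ ∀ c ∈ w, PySem.Chars.isspace c = false := by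
  simpa [PySem.Chars.split₀] using go_words s [] [] (by simp) (by simp)

theorem loopA_all_else (ws : List (List Char)) : ∀ (c : Int) (f s : List Char), 80 < c →
    (ws.foldl
      (fun (st : Int × List Char × List Char) w =>
        if st.1 + (w.length : Int) + 1 ≤ 80 then (st.1 + (w.length : Int) + 1, st.2.1 ++ w ++ [' '], st.2.2)
        else (st.1 + (w.length : Int) + 1, st.2.1, st.2.2 ++ w ++ [' '])) (c, f, s)).2
      = (f, s ++ flatW ws) := by
  induction ws with
  | nil => intro c f s _; simp [flatW]
  | cons w ws ih =>
    intro c f s hc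
    rw [List.foldl_cons]
    rw [if_neg (show ¬(c + (w.length : Int) + 1 ≤ 80) by omega)]
    rw [ih (c + (w.length : Int) + 1) f (s ++ w ++ [' ']) (by omega)]
    simp [flatW, List.append_assoc]

theorem loopA_split (ws : List (List Char)) : ∀ (c : Int) (f s : List Char),
    (ws.foldl
      (fun (st : Int × List Char × List Char) w =>
        if st.1 + (w.length : Int) + 1 ≤ 80 then (st.1 + (w.length : Int) + 1, st.2.1 ++ w ++ [' '], st.2.2)
        else (st.1 + (w.length : Int) + 1, st.2.1, st.2.2 ++ w ++ [' '])) (c, f, s)).2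
      = (f ++ flatW (ws.take (kIdx c ws)), s ++ flatW (ws.drop (kIdx c ws))) := by
  induction ws with
  | nil => intro c f s; simp [kIdx, flatW]
  | cons w ws ih =>
    intro c f s
    rw [List.foldl_cons, kIdx]
    by_cases h : c + (w.length : Int) + 1 ≤ 80
    · rw [if_pos h, if_pos h, ih]
      simp [flatW, List.append_assoc]
    · rw [if_neg h, if_neg h]
      rw [loopA_all_else ws _ f (s ++ w ++ [' ']) (by omega)]
      simp [flatW, List.append_assoc]

theorem prefix_foldl (ws : List (List Char)) : ∀ (b : Int) (acc : List Int),
    (ws.foldl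
      (fun (p : Int × List Int) w => (p.1 + (w.length : Int) + 1, p.2 ++ [p.1 + (w.length : Int) + 1]))
      (b, acc)).2 ++ [] = acc ++ (prefixRec b ws).tail := by
  induction ws with
  | nil => intro b acc; simp [prefixRec]
  | cons w ws ih =>
    intro b acc
    rw [List.foldl_cons, ih]
    rw [prefixRec]
    cases ws <;> simp [prefixRec]

theorem kIdx_le (ws : List (List Char)) : ∀ (b : Int), kIdx b ws ≤ ws.length := by
  induction ws with
  | nil => intro b; simp [kIdx]
  | cons w ws ih =>
    intro b
    rw [kIdx]
    split_ifs with h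
    · have := ih (b + (w.length : Int) + 1); simp; omega
    · simp

theorem totals_le (ws : List (List Char)) : ∀ (b : Int) (m : Nat), 1 ≤ m → m ≤ kIdx b ws →
    (prefixRec b ws).getD m 0 ≤ 80 := by
  induction ws with
  | nil => intro b m h1 h2; simp [kIdx] at h2; omega
  | cons w ws ih =>
    intro b m h1 h2
    rw [kIdx] at h2
    split_ifs at h2 with h
    · obtain ⟨m', rfl⟩ : ∃ m', m = m' + 1 := ⟨m - 1, by omega⟩
      rw [prefixRec]
      simp only [List.getD_cons_succ]
      by_cases hm0 : m' = 0
      · subst hm0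
        cases ws <;> simpa [prefixRec] using h
      · exact ih (b + (w.length : Int) + 1) m' (by omega) (by omega)
    · omega

theorem totals_all_gt (ws : List (List Char)) : ∀ (b : Int) (m : Nat), 80 < b → 1 ≤ m →
    m ≤ ws.length → (prefixRec b ws).getD m 0 > 80 := by
  induction ws with
  | nil => intro b m _ h1 h2; simp at h2; omega
  | cons w ws ih =>
    intro b m hb h1 h2
    obtain ⟨m', rfl⟩ : ∃ m', m = m' + 1 := ⟨m - 1, by omega⟩
    rw [prefixRec]
    simp only [List.getD_cons_succ]
    by_cases hm0 : m' = 0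
    · subst hm0
      have : (0 : Int) ≤ (w.length : Int) := Int.natCast_nonneg _
      cases ws <;> simp [prefixRec] <;> omega
    · exact ih (b + (w.length : Int) + 1) m'
        (by have : (0 : Int) ≤ (w.length : Int) := Int.natCast_nonneg _; omega)
        (by omega) (by simpa using Nat.lt_succ_iff.mp (by simpa using h2))

theorem totals_gt (ws : List (List Char)) : ∀ (b : Int) (m : Nat), kIdx b ws < m →
    m ≤ ws.length → (prefixRec b ws).getD m 0 > 80 := by
  induction ws with
  | nil => intro b m h1 h2; simp at h2; omega
  | cons w ws ih =>
    intro b m h1 h2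
    rw [kIdx] at h1
    obtain ⟨m', rfl⟩ : ∃ m', m = m' + 1 := ⟨m - 1, by omega⟩
    rw [prefixRec]
    simp only [List.getD_cons_succ]
    split_ifs at h1 with h
    · exact ih (b + (w.length : Int) + 1) m' (by omega) (by simpa using h2)
    · by_cases hm0 : m' = 0
      · subst hm0
        cases ws <;> simp [prefixRec] <;> omega
      · exact totals_all_gt ws (b + (w.length : Int) + 1) m' (by omega) (by omega)
          (by simpa using Nat.lt_succ_iff.mp (by simpa using h2))

theorem bsearch_eq (b : Int) (ws : List (List Char)) :
    ∀ (d lo hi : Nat), hi - lo ≤ d → lo ≤ kIdx b ws → kIdx b ws ≤ hi → hi ≤ ws.length →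
    bsearchGo (prefixRec b ws) lo hi = kIdx b ws := by
  intro d
  induction d with
  | zero =>
    intro lo hi h0 hl hh hn
    rw [bsearchGo, dif_neg (by omega)]
    omega
  | succ d ih =>
    intro lo hi h0 hl hh hn
    rw [bsearchGo]
    split_ifs with h1 h2
    · have hm1 : lo < (lo + hi + 1) / 2 := by omega
      have hm2 : (lo + hi + 1) / 2 ≤ hi := by omega
      have hmK : (lo + hi + 1) / 2 ≤ kIdx b ws := by
        by_contra hc
        have := totals_gt ws b ((lo + hi + 1) / 2) (by omega) (by omega)
        omega
      exact ih _ hi (by omega) hmK hh hn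
    · have hm1 : lo < (lo + hi + 1) / 2 := by omega
      have hK : kIdx b ws ≤ (lo + hi + 1) / 2 - 1 := by
        by_contra hc
        have := totals_le ws b ((lo + hi + 1) / 2) (by omega) (by omega)
        omega
      exact ih lo _ (by omega) hl hK (by omega)
    · omega

theorem intercalate_cons₂ (w : List Char) (ws : List (List Char)) (h : ws ≠ []) :
    List.intercalate [' '] (w :: ws) = w ++ [' '] ++ List.intercalate [' '] ws := by
  cases ws with
  | nil => simp at h
  | cons a l => simp [List.intercalate, List.intersperse]

theorem flat_eq_join (ws : List (List Char)) (h : ws ≠ []) :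
    flatW ws = List.intercalate [' '] ws ++ [' '] := by
  induction ws with
  | nil => simp at h
  | cons w ws ih =>
    by_cases h0 : ws = []
    · subst h0; simp [flatW, List.intercalate, List.intersperse]
    · rw [intercalate_cons₂ w ws h0]
      simp only [flatW, List.flatMap_cons] at *
      rw [ih h0]
      simp [List.append_assoc]

theorem rstrip_append_space (l : List Char) :
    PySem.Chars.rstrip (l ++ [' ']) = PySem.Chars.rstrip l := by
  simp [PySem.Chars.rstrip, show PySem.Chars.isspace ' ' = true from rfl]

theorem rstrip_append_nonspace (l : List Char) (c : Char) (h : PySem.Chars.isspace c = false) :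
    PySem.Chars.rstrip (l ++ [c]) = l ++ [c] := by
  simp [PySem.Chars.rstrip, h]

theorem join_ends (ws : List (List Char)) (h : ws ≠ [])
    (hP : ∀ w ∈ ws, w ≠ [] ∧ ∀ c ∈ w, PySem.Chars.isspace c = false) :
    ∃ l c, List.intercalate [' '] ws = l ++ [c] ∧ PySem.Chars.isspace c = false := by
  induction ws with
  | nil => simp at h
  | cons w ws ih =>
    by_cases h0 : ws = []
    · subst h0
      obtain ⟨hne, hch⟩ := hP w (by simp)
      rcases List.eq_nil_or_concat w with rfl | ⟨l, c, rfl⟩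
      · simp at hne
      · exact ⟨l, c, by simp [List.intercalate, List.intersperse, List.concat_eq_append],
          hch c (by simp [List.concat_eq_append])⟩
    · obtain ⟨l, c, hl, hc⟩ := ih h0 (fun w hw => hP w (List.mem_cons_of_mem _ hw))
      refine ⟨w ++ [' '] ++ l, c, ?_, hc⟩
      rw [intercalate_cons₂ w ws h0, hl]
      simp [List.append_assoc]

theorem rstrip_flat (ws : List (List Char))
    (hP : ∀ w ∈ ws, w ≠ [] ∧ ∀ c ∈ w, PySem.Chars.isspace c = false) :
    PySem.Chars.rstrip (flatW ws) = List.intercalate [' '] ws := by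
  by_cases h : ws = []
  · subst h; rfl
  · rw [flat_eq_join ws h, rstrip_append_space]
    obtain ⟨l, c, hl, hc⟩ := join_ends ws h hP
    rw [hl, rstrip_append_nonspace l c hc]

theorem A_eq (cl : String) (sp tb : Int) :
    split23comment cl sp tb
      = assemble (List.replicate tb.toNat '\t' ++ List.replicate sp.toNat ' ')
          (8 * max tb 0 + max sp 0) (PySem.Chars.split₀ cl.toList) := by
  have hw : PySem.Chars.split₀ (PySem.Chars.lstrip (lstripTab cl.toList))
      = PySem.Chars.split₀ cl.toList := by
    have e1 : PySem.Chars.lstrip (lstripTab cl.toList)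
        = List.dropWhile PySem.Chars.isspace (lstripTab cl.toList) := rfl
    rw [e1, split₀_dropWhile _ (fun _ h => h)]
    have e2 : lstripTab cl.toList = List.dropWhile (fun c => c == '\t') cl.toList := rfl
    rw [e2, split₀_dropWhile _ (fun c h => by rw [show c = '\t' by simpa using h]; decide)]
  have hbase : (0 : Int) + 8 * ((PySem.List.pyRange 0 tb 1).length : Int)
      + 1 * ((PySem.List.pyRange 0 sp 1).length : Int) = 8 * max tb 0 + max sp 0 := by
    rw [length_pyRange01, length_pyRange01, Int.toNat_eq_max, Int.toNat_eq_max]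
    ring
  have hPall := split₀_words cl.toList
  simp only [split23comment]
  rw [hw, foldl_app_const, foldl_app_const]
  simp only [List.nil_append]
  rw [hbase]
  rw [loopA_split]
  simp only [List.nil_append]
  rw [rstrip_flat ((PySem.Chars.split₀ cl.toList).take
        (kIdx (8 * max tb 0 + max sp 0) (PySem.Chars.split₀ cl.toList)))
      (fun w hw' => hPall w (List.mem_of_mem_take hw')),
      rstrip_flat ((PySem.Chars.split₀ cl.toList).drop
        (kIdx (8 * max tb 0 + max sp 0) (PySem.Chars.split₀ cl.toList)))
      (fun w hw' => hPall w (List.mem_of_mem_drop hw'))]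
  simp [assemble, List.append_assoc]

theorem B_eq (cl : String) (sp tb : Int) :
    split23comment_alt cl sp tb
      = assemble (List.replicate tb.toNat '\t' ++ List.replicate sp.toNat ' ')
          (8 * max tb 0 + max sp 0) (PySem.Chars.split₀ cl.toList) := by
  simp only [split23comment_alt]
  rw [PySem.List.pyRepeat_singleton, PySem.List.pyRepeat_singleton]
  have hpre : ((PySem.Chars.split₀ cl.toList).foldl
      (fun (p : Int × List Int) w => (p.1 + (w.length : Int) + 1, p.2 ++ [p.1 + (w.length : Int) + 1]))
      ((8 * max tb 0 + max sp 0), [8 * max tb 0 + max sp 0])).2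
      = prefixRec (8 * max tb 0 + max sp 0) (PySem.Chars.split₀ cl.toList) := by
    have h := prefix_foldl (PySem.Chars.split₀ cl.toList) (8 * max tb 0 + max sp 0)
      [8 * max tb 0 + max sp 0]
    rw [List.append_nil] at h
    rw [h]
    cases hc : PySem.Chars.split₀ cl.toList <;> simp [prefixRec]
  rw [hpre]
  rw [bsearch_eq (8 * max tb 0 + max sp 0) (PySem.Chars.split₀ cl.toList)
      (PySem.Chars.split₀ cl.toList).length 0 (PySem.Chars.split₀ cl.toList).length
      (by omega) (Nat.zero_le _) (kIdx_le _ _) (le_refl _)]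
  rw [PySem.List.slice_to _ (Int.natCast_nonneg _), PySem.List.slice_from _ (Int.natCast_nonneg _)]
  simp only [Int.toNat_natCast, PySem.Chars.join]
  simp only [assemble]
  split_ifs with h
  · rw [h]; simp [List.append_assoc]
  · simp [List.append_assoc]

-- ===== VERDICT (by name: the statement is the Claim_ definition above) =====
theorem split23comment_spec : Claim_equal_split23comment := by
  intro cl sp tb _
  show split23comment cl sp tb = split23comment_alt cl sp tb
  rw [A_eq, B_eq]
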